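-- pv_equiv track=rewrite | github.com/suchong202/A-Mobile-Natural-Human--Robot-Interaction-Method-for-Virtual-Chinese-Acupuncture | Compare2/05.py | cot_feture3
-- ===== SOURCE A (Python) =====
-- def cot_feture3(V5X, V5Y, V5Z,V7X, V7Y, V7Z):
--     dx = []
--     for i in range(0, len(V5X)):
--         dx.append(V5X[i] - V7X[i])
--     dy = []
--     for i in range(0, len(V5X)):
--         dy.append(V5Y[i] - V7Y[i])
--     dz = []
--     for i in range(0, len(V5X)):
--         dz.append(V5Z[i] - V7Z[i])
--
--     d=[]
--     for i in range(0, len(V5X)):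
--         d.append(dx[i]*dx[i]+dy[i]*dy[i]+dz[i]*dz[i])
--
--     return  max(d), min(d)
-- ===== SOURCE B (Python) =====
-- def cot_feture3(V5X, V5Y, V5Z, V7X, V7Y, V7Z):
--     mx = mn = None
--     for x5, y5, z5, x7, y7, z7 in zip(V5X, V5Y, V5Z, V7X, V7Y, V7Z):
--         s = (x5 - x7) ** 2 + (y5 - y7) ** 2 + (z5 - z7) ** 2
--         if mx is None or s > mx:
--             mx = s
--         if mn is None or s < mn:
--             mn = s
--     return mx, mn
-- ===== Notes on version B (the rewrite author's own statement) =====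
-- stated objective: simpler
-- what changed: B replaces A's four index-driven list-building passes (dx, dy, dz, d) plus max()/min() scans with one zip-driven loop keeping two running scalars; Pre_ excludes inputs where A raises (empty V5X: ValueError from max([]); another list shorter than V5X: IndexError).
import Mathlib
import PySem

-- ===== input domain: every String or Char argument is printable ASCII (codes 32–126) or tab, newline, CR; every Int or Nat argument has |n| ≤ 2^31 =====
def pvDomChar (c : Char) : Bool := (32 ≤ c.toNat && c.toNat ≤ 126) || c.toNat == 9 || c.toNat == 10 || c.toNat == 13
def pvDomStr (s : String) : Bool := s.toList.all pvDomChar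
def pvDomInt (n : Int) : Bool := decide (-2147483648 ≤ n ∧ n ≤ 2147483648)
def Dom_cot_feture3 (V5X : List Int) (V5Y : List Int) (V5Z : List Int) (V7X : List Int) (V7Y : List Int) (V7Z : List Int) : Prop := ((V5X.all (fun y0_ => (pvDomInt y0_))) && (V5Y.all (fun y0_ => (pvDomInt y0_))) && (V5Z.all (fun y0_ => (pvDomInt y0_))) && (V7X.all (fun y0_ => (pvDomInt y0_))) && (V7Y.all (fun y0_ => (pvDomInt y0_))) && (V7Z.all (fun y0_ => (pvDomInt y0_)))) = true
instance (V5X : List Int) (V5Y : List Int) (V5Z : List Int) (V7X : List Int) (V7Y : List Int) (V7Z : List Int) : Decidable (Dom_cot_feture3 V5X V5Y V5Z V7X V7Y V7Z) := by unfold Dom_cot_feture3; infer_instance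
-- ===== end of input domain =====

-- B replaces A's four list-building passes with one zip-driven loop keeping two running scalars (same values, O(1) extra space).
-- ===== PORT A =====
def cot_feture3 (V5X : List Int) (V5Y : List Int) (V5Z : List Int) (V7X : List Int) (V7Y : List Int) (V7Z : List Int) : Int × Int :=
  let n : Int := V5X.length
  let dx := (PySem.List.pyRange 0 n 1).foldl
    (fun acc i => acc ++ [PySem.List.pyGetD V5X i 0 - PySem.List.pyGetD V7X i 0]) []
  let dy := (PySem.List.pyRange 0 n 1).foldl
    (fun acc i => acc ++ [PySem.List.pyGetD V5Y i 0 - PySem.List.pyGetD V7Y i 0]) []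
  let dz := (PySem.List.pyRange 0 n 1).foldl
    (fun acc i => acc ++ [PySem.List.pyGetD V5Z i 0 - PySem.List.pyGetD V7Z i 0]) []
  let d := (PySem.List.pyRange 0 n 1).foldl
    (fun acc i => acc ++ [PySem.List.pyGetD dx i 0 * PySem.List.pyGetD dx i 0
      + PySem.List.pyGetD dy i 0 * PySem.List.pyGetD dy i 0
      + PySem.List.pyGetD dz i 0 * PySem.List.pyGetD dz i 0]) []
  ((PySem.List.max? d (fun y => y)).getD 0, (PySem.List.min? d (fun y => y)).getD 0)

-- ===== PORT B =====
-- squared distance of one zipped tuple (the body of Source B's loop)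
def pvSq6 (t : Int × Int × Int × Int × Int × Int) : Int :=
  (t.1 - t.2.2.2.1) ^ 2 + (t.2.1 - t.2.2.2.2.1) ^ 2 + (t.2.2.1 - t.2.2.2.2.2) ^ 2

def cot_feture3_alt (V5X : List Int) (V5Y : List Int) (V5Z : List Int) (V7X : List Int) (V7Y : List Int) (V7Z : List Int) : Int × Int :=
  let z := V5X.zip (V5Y.zip (V5Z.zip (V7X.zip (V7Y.zip V7Z))))
  let r := z.foldl (fun (p : Option Int × Option Int) t =>
      let s := pvSq6 t
      ( match p.1 with | none => some s | some m => if s > m then some s else some m,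
        match p.2 with | none => some s | some m => if s < m then some s else some m ))
    (none, none)
  (r.1.getD 0, r.2.getD 0)  -- under Pre_ both options are some; Python B returns None outside Pre_

-- ===== PRECONDITION & SPEC =====
-- Pre_ excludes exactly the inputs where Python A raises: empty V5X (max of empty list, ValueError)
-- and any of the other five lists shorter than V5X (IndexError).
def Pre_cot_feture3 (V5X : List Int) (V5Y : List Int) (V5Z : List Int) (V7X : List Int) (V7Y : List Int) (V7Z : List Int) : Prop :=
  V5X ≠ [] ∧ V5X.length ≤ V5Y.length ∧ V5X.length ≤ V5Z.length ∧
  V5X.length ≤ V7X.length ∧ V5X.length ≤ V7Y.length ∧ V5X.length ≤ V7Z.length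
instance (V5X : List Int) (V5Y : List Int) (V5Z : List Int) (V7X : List Int) (V7Y : List Int) (V7Z : List Int) : Decidable (Pre_cot_feture3 V5X V5Y V5Z V7X V7Y V7Z) := by unfold Pre_cot_feture3; infer_instance

def pvWitness_cot_feture3 : List Int × List Int × List Int × List Int × List Int × List Int :=
  ([1, 2], [0, 1], [3, 3], [0, 0], [1, 1], [2, 2])

def Spec_cot_feture3 (V5X : List Int) (V5Y : List Int) (V5Z : List Int) (V7X : List Int) (V7Y : List Int) (V7Z : List Int) (out : Int × Int) : Prop := out = cot_feture3_alt V5X V5Y V5Z V7X V7Y V7Z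
instance (V5X : List Int) (V5Y : List Int) (V5Z : List Int) (V7X : List Int) (V7Y : List Int) (V7Z : List Int) (out : Int × Int) : Decidable (Spec_cot_feture3 V5X V5Y V5Z V7X V7Y V7Z out) := by unfold Spec_cot_feture3; infer_instance

-- ===== CLAIM =====
def Claim_equal_cot_feture3 : Prop := ∀ (V5X : List Int) (V5Y : List Int) (V5Z : List Int) (V7X : List Int) (V7Y : List Int) (V7Z : List Int), Dom_cot_feture3 V5X V5Y V5Z V7X V7Y V7Z → Pre_cot_feture3 V5X V5Y V5Z V7X V7Y V7Z → Spec_cot_feture3 V5X V5Y V5Z V7X V7Y V7Z (cot_feture3 V5X V5Y V5Z V7X V7Y V7Z)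

-- ===== LEMMAS AND PROOFS =====

-- index form of the squared distance (matches A's d-list entries)
def pvSqI (V5X : List Int) (V5Y : List Int) (V5Z : List Int) (V7X : List Int) (V7Y : List Int) (V7Z : List Int) (i : Int) : Int :=
  let a := PySem.List.pyGetD V5X i 0 - PySem.List.pyGetD V7X i 0
  let b := PySem.List.pyGetD V5Y i 0 - PySem.List.pyGetD V7Y i 0
  let c := PySem.List.pyGetD V5Z i 0 - PySem.List.pyGetD V7Z i 0
  a * a + b * b + c * c

-- B's Option-state loop, once both components are some, computes foldl max / foldl min of the mapped values.
lemma pvFoldOpt {α : Type} (sq : α → Int) (l : List α) (a b : Int) :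
    l.foldl (fun (p : Option Int × Option Int) t =>
        let s := sq t
        ( match p.1 with | none => some s | some m => if s > m then some s else some m,
          match p.2 with | none => some s | some m => if s < m then some s else some m ))
      (some a, some b)
      = (some ((l.map sq).foldl max a), some ((l.map sq).foldl min b)) := by
  induction l generalizing a b with
  | nil => simp
  | cons x t ih =>
      simp only [List.foldl_cons, List.map_cons]
      have h1 : (if sq x > a then some (sq x) else some a) = some (max a (sq x)) := by
        split_ifs with h
        · rw [max_eq_right h.le]
        · rw [max_eq_left (not_lt.1 h)]
      have h2 : (if sq x < b then some (sq x) else some b) = some (min b (sq x)) := by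
        split_ifs with h
        · rw [min_eq_right h.le]
        · rw [min_eq_left (not_lt.1 h)]
      rw [h1, h2]
      exact ih (max a (sq x)) (min b (sq x))

-- ===== VERDICT =====
theorem cot_feture3_spec : Claim_equal_cot_feture3 := by
  intro V5X V5Y V5Z V7X V7Y V7Z _ hpre
  obtain ⟨hne, h1, h2, h3, h4, h5⟩ := hpre
  unfold Spec_cot_feture3 cot_feture3 cot_feture3_alt
  dsimp only
  set n : Int := (V5X.length : Int) with hn
  have hpos : (0 : Int) < n := by
    simp only [hn]
    exact_mod_cast List.length_pos_iff.mpr hne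
  -- A: the appended lists are maps over the index range
  rw [PySem.List.foldl_append_singleton_eq_map, PySem.List.foldl_append_singleton_eq_map,
      PySem.List.foldl_append_singleton_eq_map, PySem.List.foldl_append_singleton_eq_map]
  simp only [List.nil_append]
  have hd : (PySem.List.pyRange 0 n 1).map (fun i =>
      PySem.List.pyGetD ((PySem.List.pyRange 0 n 1).map (fun i => PySem.List.pyGetD V5X i 0 - PySem.List.pyGetD V7X i 0)) i 0
        * PySem.List.pyGetD ((PySem.List.pyRange 0 n 1).map (fun i => PySem.List.pyGetD V5X i 0 - PySem.List.pyGetD V7X i 0)) i 0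
      + PySem.List.pyGetD ((PySem.List.pyRange 0 n 1).map (fun i => PySem.List.pyGetD V5Y i 0 - PySem.List.pyGetD V7Y i 0)) i 0
        * PySem.List.pyGetD ((PySem.List.pyRange 0 n 1).map (fun i => PySem.List.pyGetD V5Y i 0 - PySem.List.pyGetD V7Y i 0)) i 0
      + PySem.List.pyGetD ((PySem.List.pyRange 0 n 1).map (fun i => PySem.List.pyGetD V5Z i 0 - PySem.List.pyGetD V7Z i 0)) i 0
        * PySem.List.pyGetD ((PySem.List.pyRange 0 n 1).map (fun i => PySem.List.pyGetD V5Z i 0 - PySem.List.pyGetD V7Z i 0)) i 0)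
      = (PySem.List.pyRange 0 n 1).map (pvSqI V5X V5Y V5Z V7X V7Y V7Z) := by
    apply List.map_congr_left
    intro i hi
    have hi' := (PySem.List.mem_pyRange_one).1 hi
    rw [PySem.List.pyGetD_map_pyRange_of_nonneg _ _ _ _ hi'.1 hi'.2,
        PySem.List.pyGetD_map_pyRange_of_nonneg _ _ _ _ hi'.1 hi'.2,
        PySem.List.pyGetD_map_pyRange_of_nonneg _ _ _ _ hi'.1 hi'.2]
    rfl
  rw [hd]
  -- B: the zipped list maps to the same squared values
  have hz : (V5X.zip (V5Y.zip (V5Z.zip (V7X.zip (V7Y.zip V7Z))))).map pvSq6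
      = (PySem.List.pyRange 0 n 1).map (pvSqI V5X V5Y V5Z V7X V7Y V7Z) := by
    apply List.ext_getElem
    · simp [PySem.List.length_pyRange_one]
      omega
    · intro k hk1 hk2
      have hkn : k < V5X.length := by
        simp at hk1; omega
      simp only [List.getElem_map, List.getElem_zip]
      rw [PySem.List.getElem_pyRange_one]
      have hcast : (0 : Int) + (k : Int) = (k : Int) := by ring
      rw [hcast]
      unfold pvSq6 pvSqI
      rw [PySem.List.pyGetD_eq_getElem _ _ (Int.natCast_nonneg k) (by exact_mod_cast hkn),
          PySem.List.pyGetD_eq_getElem _ _ (Int.natCast_nonneg k) (by exact_mod_cast (Nat.lt_of_lt_of_le hkn h3)),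
          PySem.List.pyGetD_eq_getElem _ _ (Int.natCast_nonneg k) (by exact_mod_cast (Nat.lt_of_lt_of_le hkn h1)),
          PySem.List.pyGetD_eq_getElem _ _ (Int.natCast_nonneg k) (by exact_mod_cast (Nat.lt_of_lt_of_le hkn h4)),
          PySem.List.pyGetD_eq_getElem _ _ (Int.natCast_nonneg k) (by exact_mod_cast (Nat.lt_of_lt_of_le hkn h2)),
          PySem.List.pyGetD_eq_getElem _ _ (Int.natCast_nonneg k) (by exact_mod_cast (Nat.lt_of_lt_of_le hkn h5))]
      simp only [Int.toNat_natCast]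
      ring
  -- split off the first element on both sides and reduce B's loop
  rw [PySem.List.pyRange_one_cons hpos, List.map_cons] at hd hz ⊢
  rw [PySem.List.max?_id_cons, PySem.List.min?_id_cons]
  cases hzl : V5X.zip (V5Y.zip (V5Z.zip (V7X.zip (V7Y.zip V7Z)))) with
  | nil => rw [hzl] at hz; simp at hz
  | cons zh zt =>
      rw [hzl] at hz
      simp only [List.map_cons, List.cons.injEq] at hz
      obtain ⟨hzh, hzt⟩ := hz
      simp only [List.foldl_cons]
      rw [pvFoldOpt pvSq6 zt (pvSq6 zh) (pvSq6 zh), hzt, hzh]
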